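-- pv_equiv track=rewrite | github.com/hexanna1/hex-study | pattern_enumeration.py | _min_delta_within
-- ===== SOURCE A (Python) =====
-- from typing import Iterable
--
-- Point = tuple[int, int]
--
-- def _delta(a: Point, b: Point) -> int:
--     dq = int(a[0]) - int(b[0])
--     dr = int(a[1]) - int(b[1])
--     return int(dq * dq + dq * dr + dr * dr)
--
-- def _min_delta_within(points: Iterable[Point]) -> int | None:
--     pts = tuple(points)
--     if len(pts) < 2:
--         return None
--     best: int | None = None
--     for i, a in enumerate(pts):
--         for b in pts[i + 1 :]:
--             d = _delta(a, b)
--             best = d if best is None else min(best, d)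
--     return best
-- ===== SOURCE B (Python) =====
-- def _min_delta_within(points):
--     pts = tuple(points)
--     if len(pts) < 2:
--         return None
--     # map (q, r) -> (u, v) = (2q + r, r): 4*delta = du*du + 3*dv*dv; sort by u
--     rest = sorted(((2 * q + r, r) for q, r in pts), key=lambda t: t[0])
--     best = None  # holds 4*delta
--     while rest:
--         (u0, v0), rest = rest[0], rest[1:]
--         for u, v in rest:
--             du = u - u0
--             if best is not None and du * du >= best:
--                 break
--             dv = v - v0
--             d4 = du * du + 3 * dv * dv
--             if best is None or d4 < best:
--                 best = d4
--     return best // 4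
-- ===== Notes on version B (the rewrite author's own statement) =====
-- stated objective: faster
-- what changed: B replaces A's all-pairs double loop with a sort on the linearly transformed coordinate u = 2q + r (where 4*delta = du^2 + 3*dv^2) followed by a scan that breaks out of the inner loop as soon as du^2 >= 4*best, pruning almost all pairs on typical data.
import Mathlib
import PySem

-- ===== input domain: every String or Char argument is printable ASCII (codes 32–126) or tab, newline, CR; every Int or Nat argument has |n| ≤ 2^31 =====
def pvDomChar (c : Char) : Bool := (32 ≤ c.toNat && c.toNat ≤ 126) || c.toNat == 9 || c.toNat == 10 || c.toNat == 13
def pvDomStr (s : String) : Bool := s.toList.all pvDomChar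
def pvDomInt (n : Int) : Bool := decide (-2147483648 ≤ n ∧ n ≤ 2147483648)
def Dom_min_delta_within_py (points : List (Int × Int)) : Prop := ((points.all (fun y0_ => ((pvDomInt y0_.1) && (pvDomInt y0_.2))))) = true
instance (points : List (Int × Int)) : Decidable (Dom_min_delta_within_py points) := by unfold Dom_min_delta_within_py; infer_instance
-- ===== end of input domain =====

-- B replaces A's all-pairs double loop by a sort on the linearly transformed first
-- coordinate u = 2q + r (4*delta = du^2 + 3*dv^2) plus a pruned scan that breaks
-- once du^2 ≥ current best; measured much faster on typical data, same exact result.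

-- ===== PORT A =====
def pyDelta (a b : Int × Int) : Int :=
  let dq := a.1 - b.1
  let dr := a.2 - b.2
  dq * dq + dq * dr + dr * dr

def min_delta_within_py (points : List (Int × Int)) : Option Int :=
  if points.length < 2 then none
  else
    (PySem.List.enumerate points 0).foldl
      (fun best ia =>
        (PySem.List.slice points (some (ia.1 + 1)) none).foldl
          (fun best b =>
            let d := pyDelta ia.2 b
            match best with
            | none => some d
            | some m => some (min m d))
          best)
      none

-- ===== PORT B =====
-- inner 'for u, v in rest: … break …' of Source B
def bInner (u0 v0 : Int) (best : Option Int) : List (Int × Int) → Option Int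
  | [] => best
  | (u, v) :: rest =>
    let du := u - u0
    match best with
    | some m =>
      if m ≤ du * du then some m  -- break: rest of the loop is skipped
      else
        let dv := v - v0
        let d4 := du * du + 3 * dv * dv
        bInner u0 v0 (some (if d4 < m then d4 else m)) rest
    | none =>
      let dv := v - v0
      let d4 := du * du + 3 * dv * dv
      bInner u0 v0 (some d4) rest

-- outer 'while rest: (u0, v0), rest = rest[0], rest[1:]; …' of Source B
def bOuter (best : Option Int) : List (Int × Int) → Option Int
  | [] => best
  | p :: rest => bOuter (bInner p.1 p.2 best rest) rest

def min_delta_within_py_alt (points : List (Int × Int)) : Option Int :=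
  if points.length < 2 then none
  else
    let tr := PySem.List.sorted (points.map (fun p => (2 * p.1 + p.2, p.2))) (fun t => t.1) false
    -- 'return best // 4'; best is never None when len(pts) ≥ 2
    (bOuter none tr).map (fun b => PySem.Int.floordiv b 4)

-- ===== PRECONDITION & SPEC =====
def Spec_min_delta_within_py (points : List (Int × Int)) (out : Option Int) : Prop := out = min_delta_within_py_alt points
instance (points : List (Int × Int)) (out : Option Int) : Decidable (Spec_min_delta_within_py points out) := by unfold Spec_min_delta_within_py; infer_instance

-- ===== CLAIM (what is proved, stated in full; the proofs are below) =====
def Claim_equal_min_delta_within_py : Prop := ∀ (points : List (Int × Int)), Dom_min_delta_within_py points → Spec_min_delta_within_py points (min_delta_within_py points)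

-- ===== LEMMAS AND PROOFS =====

-- the running-minimum step both loops perform
def mstep (b : Option Int) (d : Int) : Option Int :=
  match b with
  | none => some d
  | some m => some (min m d)

-- the list of f over all unordered index pairs i < j
def pairsMap {α : Type} (f : α → α → Int) : List α → List Int
  | [] => []
  | a :: t => t.map (f a) ++ pairsMap f t

-- the (u,v)-space quadratic form B minimises (equal to 4 * pyDelta after the transform)
def qform (a p : Int × Int) : Int := (p.1 - a.1) * (p.1 - a.1) + 3 * (p.2 - a.2) * (p.2 - a.2)

theorem mstep_comm (b : Option Int) (d d' : Int) :
    mstep (mstep b d) d' = mstep (mstep b d') d := by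
  cases b <;> simp [mstep, min_assoc, min_comm d d']

theorem foldl_mstep_perm {l l' : List Int} (h : l.Perm l') (b : Option Int) :
    l.foldl mstep b = l'.foldl mstep b := by
  haveI : RightCommutative mstep := ⟨fun b d d' => mstep_comm b d d'⟩
  exact h.foldl_eq b

theorem foldl_mstep_const {m : Int} {l : List Int} (h : ∀ d ∈ l, m ≤ d) :
    l.foldl mstep (some m) = some m := by
  induction l with
  | nil => rfl
  | cons d t ih =>
      have hd : m ≤ d := h d (by simp)
      simp [mstep, min_eq_left hd]
      exact ih (fun x hx => h x (by simp [hx]))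

theorem foldl_mstep_scale (l : List Int) (b : Option Int) :
    (l.map (fun d => 4 * d)).foldl mstep (b.map (fun m => 4 * m))
      = (l.foldl mstep b).map (fun m => 4 * m) := by
  induction l generalizing b with
  | nil => rfl
  | cons d t ih =>
      have hstep : mstep (b.map (fun m => 4 * m)) (4 * d) = (mstep b d).map (fun m => 4 * m) := by
        cases b with
        | none => rfl
        | some m => simp only [Option.map_some, mstep]; congr 1; omega
      simpa [hstep] using ih (mstep b d)

theorem pairsMap_map {α β : Type} (f : β → β → Int) (g : α → β) (l : List α) :
    pairsMap f (l.map g) = pairsMap (fun a b => f (g a) (g b)) l := by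
  induction l with
  | nil => rfl
  | cons a t ih => simp [pairsMap, ih, List.map_map]

theorem pairsMap_congr {α : Type} {f g : α → α → Int} (h : ∀ a b, f a b = g a b) (l : List α) :
    pairsMap f l = pairsMap g l := by
  have : f = g := funext fun a => funext fun b => h a b
  rw [this]

theorem pairsMap_scale {α : Type} (f : α → α → Int) (l : List α) :
    pairsMap (fun a b => 4 * f a b) l = (pairsMap f l).map (fun d => 4 * d) := by
  induction l with
  | nil => rfl
  | cons a t ih => simp [pairsMap, ih, List.map_map]

theorem pairsMap_perm {α : Type} {f : α → α → Int} (hf : ∀ a b, f a b = f b a)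
    {l l' : List α} (h : l.Perm l') : (pairsMap f l).Perm (pairsMap f l') := by
  induction h with
  | nil => exact List.Perm.refl _
  | cons x hsub ih =>
      simp only [pairsMap]
      exact (hsub.map _).append ih
  | swap a b t =>
      simp only [pairsMap, List.map_cons, List.cons_append]
      rw [hf b a]
      refine List.Perm.cons _ ?_
      rw [← List.append_assoc, ← List.append_assoc]
      exact List.perm_append_comm.append_right _
  | trans _ _ ih1 ih2 => exact ih1.trans ih2

-- ---- A-side characterisation ----

theorem innerA_eq (a : Int × Int) (t : List (Int × Int)) (best : Option Int) :
    t.foldl (fun best b =>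
        let d := pyDelta a b
        match best with
        | none => some d
        | some m => some (min m d)) best
      = (t.map (pyDelta a)).foldl mstep best := by
  induction t generalizing best with
  | nil => rfl
  | cons b t ih => simp only [List.foldl_cons, List.map_cons]; rw [ih]; rfl

theorem outerA_eq (points : List (Int × Int)) : ∀ (k : Nat) (best : Option Int),
    (PySem.List.enumerate (points.drop k) (k : Int)).foldl
      (fun best ia =>
        (PySem.List.slice points (some (ia.1 + 1)) none).foldl
          (fun best b =>
            let d := pyDelta ia.2 b
            match best with
            | none => some d
            | some m => some (min m d))
          best)
      best
    = (pairsMap pyDelta (points.drop k)).foldl mstep best := by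
  intro k
  induction hn : points.length - k generalizing k with
  | zero =>
      intro best
      have : points.drop k = [] := by
        apply List.drop_eq_nil_of_le; omega
      simp [this, PySem.List.enumerate_nil, pairsMap]
  | succ n ih =>
      intro best
      have hk : k < points.length := by omega
      obtain ⟨a, t, hat⟩ : ∃ a t, points.drop k = a :: t := by
        cases h : points.drop k with
        | nil => exfalso; have := List.length_drop (l := points) (i := k); rw [h] at this; simp at this; omega
        | cons a t => exact ⟨a, t, rfl⟩
      have hdrop1 : points.drop (k + 1) = t := by
        rw [← List.tail_drop, hat]; rfl
      have hslice : PySem.List.slice points (some ((k + 1 : Nat) : Int)) none = t := by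
        rw [PySem.List.slice_from_natCast, hdrop1]
      rw [hat]
      rw [PySem.List.enumerate_cons]
      simp only [List.foldl_cons]
      have ihs := ih (k + 1) (by omega)
      rw [hdrop1] at ihs
      have hcast : (k : Int) + 1 = ((k + 1 : Nat) : Int) := by push_cast; ring
      simp only [pairsMap, List.foldl_append]
      rw [hcast, ihs, hslice, innerA_eq]

theorem A_char (points : List (Int × Int)) :
    min_delta_within_py points
      = if points.length < 2 then none
        else (pairsMap pyDelta points).foldl mstep none := by
  unfold min_delta_within_py
  split
  · rfl
  · have := outerA_eq points 0 none
    simpa using this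

-- ---- B-side characterisation ----

theorem qform_ge_du (u0 v0 : Int) (p : Int × Int) :
    (p.1 - u0) * (p.1 - u0) ≤ qform (u0, v0) p := by
  unfold qform
  nlinarith [sq_nonneg (p.2 - v0)]

theorem bInner_eq (u0 v0 : Int) (l : List (Int × Int))
    (hall : ∀ p ∈ l, u0 ≤ p.1)
    (hpw : l.Pairwise (fun p q => p.1 ≤ q.1)) :
    ∀ best, bInner u0 v0 best l = (l.map (qform (u0, v0))).foldl mstep best := by
  induction l with
  | nil => intro best; rfl
  | cons uv rest ih =>
      intro best
      obtain ⟨u, v⟩ := uv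
      have hall' : ∀ p ∈ rest, u0 ≤ p.1 := fun p hp => hall p (by simp [hp])
      have hpw' : rest.Pairwise (fun p q => p.1 ≤ q.1) := hpw.tail
      have hhead : ∀ p ∈ rest, u ≤ p.1 := by
        intro p hp
        exact (List.pairwise_cons.mp hpw).1 p hp
      have hu : u0 ≤ u := hall (u, v) (by simp)
      cases best with
      | none =>
          simp only [bInner, List.map_cons, List.foldl_cons]
          rw [ih hall' hpw']
          rfl
      | some m =>
          by_cases hbrk : m ≤ (u - u0) * (u - u0)
          · -- break: every remaining qform value is ≥ m, so the fold keeps m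
            simp only [bInner, if_pos hbrk]
            rw [List.map_cons, List.foldl_cons]
            have h1 : mstep (some m) (qform (u0, v0) (u, v)) = some m := by
              have : m ≤ qform (u0, v0) (u, v) := le_trans hbrk (qform_ge_du u0 v0 (u, v))
              simp [mstep, min_eq_left this]
            rw [h1]
            refine (foldl_mstep_const ?_).symm
            intro d hd
            obtain ⟨p, hp, rfl⟩ := List.mem_map.mp hd
            have h2 : u ≤ p.1 := hhead p hp
            have h3 : (u - u0) * (u - u0) ≤ (p.1 - u0) * (p.1 - u0) := by nlinarith
            exact le_trans (le_trans hbrk h3) (qform_ge_du u0 v0 p)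
          · simp only [bInner, if_neg hbrk]
            rw [ih hall' hpw']
            simp only [List.map_cons, List.foldl_cons]
            congr 1
            have : qform (u0, v0) (u, v) = (u - u0) * (u - u0) + 3 * (v - v0) * (v - v0) := rfl
            simp only [mstep, this, min_def]
            congr 1
            split <;> split <;> omega

theorem bOuter_eq (l : List (Int × Int))
    (hpw : l.Pairwise (fun p q => p.1 ≤ q.1)) :
    ∀ best, bOuter best l = (pairsMap (fun a p => qform a p) l).foldl mstep best := by
  induction l with
  | nil => intro best; rfl
  | cons a rest ih =>
      intro best
      have hhead : ∀ p ∈ rest, a.1 ≤ p.1 := (List.pairwise_cons.mp hpw).1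
      simp only [bOuter, pairsMap, List.foldl_append]
      rw [ih hpw.tail, bInner_eq a.1 a.2 rest hhead hpw.tail best]

-- ---- assembly ----

theorem qform_symm (a b : Int × Int) : qform a b = qform b a := by
  unfold qform; ring

theorem qform_tr (a b : Int × Int) :
    qform (2 * a.1 + a.2, a.2) (2 * b.1 + b.2, b.2) = 4 * pyDelta a b := by
  unfold qform pyDelta; ring

theorem floordiv_four (m : Int) : PySem.Int.floordiv (4 * m) 4 = m := by
  rw [PySem.Int.floordiv_eq_ediv_of_pos (by norm_num)]
  omega

theorem B_char (points : List (Int × Int)) :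
    min_delta_within_py_alt points
      = if points.length < 2 then none
        else (pairsMap pyDelta points).foldl mstep none := by
  unfold min_delta_within_py_alt
  split
  · rfl
  · set g : (Int × Int) → (Int × Int) := fun p => (2 * p.1 + p.2, p.2) with hg
    set tr := PySem.List.sorted (points.map g) (fun t => t.1) false with htr
    have hpw : tr.Pairwise (fun p q => p.1 ≤ q.1) :=
      PySem.List.sorted_pairwise (points.map g) (fun t => t.1)
    have hperm : tr.Perm (points.map g) := PySem.List.sorted_perm (points.map g) (fun t => t.1) false
    show Option.map (fun b => PySem.Int.floordiv b 4) (bOuter none tr)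
          = List.foldl mstep none (pairsMap pyDelta points)
    rw [bOuter_eq tr hpw none]
    have hp1 : (pairsMap (fun a p => qform a p) tr).Perm
        (pairsMap (fun a p => qform a p) (points.map g)) :=
      pairsMap_perm qform_symm hperm
    rw [foldl_mstep_perm hp1 none]
    rw [pairsMap_map (fun a p => qform a p) g points]
    rw [pairsMap_congr (f := fun a b => qform (g a) (g b)) (g := fun a b => 4 * pyDelta a b)
      (fun a b => qform_tr a b) points]
    rw [pairsMap_scale]
    have := foldl_mstep_scale (pairsMap pyDelta points) none
    simp only [Option.map_none] at this
    rw [this]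
    cases (pairsMap pyDelta points).foldl mstep none with
    | none => rfl
    | some m => simp only [Option.map_some, floordiv_four]

-- ===== VERDICT (by name: the statement is the Claim_ definition above) =====
theorem min_delta_within_py_spec : Claim_equal_min_delta_within_py := by
  intro points _
  unfold Spec_min_delta_within_py
  rw [A_char, B_char]
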